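-- pv_equiv track=rewrite | github.com/khaled-abulebdeh/Symmetric-Cryptography-System | Main.py | form_64bit_key
-- ===== SOURCE A (Python) =====
-- def parity (binary: str):
--     result=0
--     for digit in binary:
--         result^= int(digit)
--     return result
--
-- def form_64bit_key (int_key: int ):
--     binary_key=format(int_key, 'b')
--     length= len(binary_key)
--     if length<=7:
--         result= "0"*(56) + "0"*(7-length) + binary_key + str(parity(binary_key))
--
--     elif length <=14:
--         low= binary_key[-7:]
--         low_result=   low + str(parity(low))
--         high= binary_key[:-7]
--         high_result= "0"*(7-len(high)) + high + str(parity(high))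
--         result= "0"*(48)+ high_result+low_result
--     #else: implement cases to handle strong keys (more than effective 12-bit keys)
--     result = [int(char) for char in result] # to become a list of digits, [0,0,1,...,0]
--     return result
-- ===== SOURCE B (Python) =====
-- def form_64bit_key(int_key):
--     # pure integer arithmetic: peel seven bits off the key twice with divmod,
--     # building each parity-tagged chunk back-to-front; no strings involved
--     n, out = int_key, []
--     for _ in range(2):
--         bits, p = [], 0
--         for _ in range(7):
--             n, b = divmod(n, 2)
--             bits.append(b)
--             p ^= b
--         out = bits[::-1] + [p] + out
--     return [0] * 48 + out
-- ===== Notes on version B (the rewrite author's own statement) =====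
-- stated objective: alternative
-- what changed: Replaces A's string pipeline (format(int,'b'), per-branch zero-padding, slicing, a parity helper over digit characters, and a final int(char) re-parse) by pure integer arithmetic: two passes that each peel seven bits off the key with divmod, accumulating the parity and building each parity-tagged chunk back-to-front, never touching strings.
import Mathlib
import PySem

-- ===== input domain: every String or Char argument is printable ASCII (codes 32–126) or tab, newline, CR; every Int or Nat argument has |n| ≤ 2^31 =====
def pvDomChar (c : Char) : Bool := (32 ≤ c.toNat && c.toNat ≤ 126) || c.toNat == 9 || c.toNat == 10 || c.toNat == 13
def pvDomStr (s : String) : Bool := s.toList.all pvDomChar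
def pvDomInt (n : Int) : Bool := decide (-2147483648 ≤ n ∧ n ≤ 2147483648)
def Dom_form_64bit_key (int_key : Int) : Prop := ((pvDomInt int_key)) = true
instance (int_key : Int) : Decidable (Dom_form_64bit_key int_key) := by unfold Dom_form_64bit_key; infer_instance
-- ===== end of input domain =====

-- B replaces A's string formatting/slicing by pure integer arithmetic: it peels seven bits
-- off the key twice with divmod, building each parity-tagged chunk back-to-front (alternative).


-- ===== PORT A =====
-- format(n,'b') for n > 0, most significant bit first
def pvBinAux (n : Nat) : List Char :=
  if _h : n = 0 then [] else pvBinAux (n / 2) ++ [if n % 2 = 1 then '1' else '0']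
termination_by n
decreasing_by exact Nat.div_lt_self (Nat.pos_of_ne_zero _h) (by omega)

def pvBinNat (n : Nat) : List Char := if n = 0 then ['0'] else pvBinAux n

-- format(int_key, 'b') as a character list
def pvFormatBin (i : Int) : List Char :=
  if i < 0 then '-' :: pvBinNat i.natAbs else pvBinNat i.toNat

-- int(char): exact on the digit chars '0'/'1' reached under Pre_ (Python raises on '-')
def pvDigit (c : Char) : Int := if c = '1' then 1 else 0

-- parity(binary): result=0; for digit in binary: result ^= int(digit)
def pvParity (b : List Char) : Int := b.foldl (fun r c => PySem.Int.bxor r (pvDigit c)) 0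

-- str(parity(..)): the parity is always 0 or 1, so it is one digit char
def pvParityChar (p : Int) : Char := if p = 1 then '1' else '0'

def form_64bit_key (int_key : Int) : List Int :=
  let binary_key := pvFormatBin int_key
  let length := binary_key.length
  if length ≤ 7 then
    (List.replicate 56 '0' ++ List.replicate (7 - length) '0' ++ binary_key
      ++ [pvParityChar (pvParity binary_key)]).map pvDigit
  else if length ≤ 14 then
    let low := PySem.List.slice binary_key (some (-7)) none
    let low_result := low ++ [pvParityChar (pvParity low)]
    let high := PySem.List.slice binary_key none (some (-7))
    let high_result := List.replicate (7 - high.length) '0' ++ high ++ [pvParityChar (pvParity high)]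
    (List.replicate 48 '0' ++ high_result ++ low_result).map pvDigit
  else []  -- Python: 'result' is unbound here → UnboundLocalError; excluded by Pre_

-- ===== PORT B =====
-- inner loop of Source B: for _ in range(7): n, b = divmod(n, 2); bits.append(b); p ^= b
def pvInner : Nat → Int → List Int → Int → Int × List Int × Int
  | 0, n, bits, p => (n, bits, p)
  | k + 1, n, bits, p =>
      let b := PySem.Int.mod n 2
      pvInner k (PySem.Int.floordiv n 2) (bits ++ [b]) (PySem.Int.bxor p b)

-- outer loop of Source B: for _ in range(2): … ; out = bits[::-1] + [p] + out
def pvOuter : Nat → Int → List Int → List Int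
  | 0, _, out => out
  | k + 1, n, out =>
      let r := pvInner 7 n [] 0
      pvOuter k r.1 (r.2.1.reverse ++ [r.2.2] ++ out)

def form_64bit_key_alt (int_key : Int) : List Int :=
  List.replicate 48 0 ++ pvOuter 2 int_key []

-- ===== PRECONDITION & SPEC =====
-- Pre_ excludes exactly the inputs where A raises: negative keys (int('-') → ValueError)
-- and keys too long for either formatting branch ('result' unbound → UnboundLocalError).
def Pre_form_64bit_key (int_key : Int) : Prop := 0 ≤ int_key ∧ int_key < 16384
instance (int_key : Int) : Decidable (Pre_form_64bit_key int_key) := by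
  unfold Pre_form_64bit_key; infer_instance
def pvWitness_form_64bit_key : Int := (42)

def Spec_form_64bit_key (int_key : Int) (out : List Int) : Prop := out = form_64bit_key_alt int_key
instance (int_key : Int) (out : List Int) : Decidable (Spec_form_64bit_key int_key out) := by unfold Spec_form_64bit_key; infer_instance

-- ===== CLAIM (what is proved, stated in full; the proofs are below) =====
def Claim_equal_form_64bit_key : Prop := ∀ (int_key : Int), Dom_form_64bit_key int_key → Pre_form_64bit_key int_key → Spec_form_64bit_key int_key (form_64bit_key int_key)

-- ===== LEMMAS AND PROOFS =====

-- fixed-width lsb-first digit list of a natural number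
def pvFixN : Nat → Nat → List Nat
  | 0, _ => []
  | k + 1, m => m % 2 :: pvFixN k (m / 2)

-- cast a digit list to the integers
def pvCastList (l : List Nat) : List Int := l.map (fun x : Nat => (x : Int))

theorem pvCastList_nil : pvCastList [] = [] := rfl
theorem pvCastList_cons (x : Nat) (l : List Nat) :
    pvCastList (x :: l) = ((x : Nat) : Int) :: pvCastList l := rfl
theorem pvCastList_append (l₁ l₂ : List Nat) :
    pvCastList (l₁ ++ l₂) = pvCastList l₁ ++ pvCastList l₂ := by
  unfold pvCastList; exact List.map_append ..
theorem pvCastList_reverse (l : List Nat) :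
    pvCastList l.reverse = (pvCastList l).reverse := by
  unfold pvCastList; exact List.map_reverse ..
theorem pvCastList_length (l : List Nat) : (pvCastList l).length = l.length := by
  unfold pvCastList; exact List.length_map ..
theorem pvCastList_replicate_zero (k : Nat) :
    pvCastList (List.replicate k 0) = List.replicate k 0 := by
  unfold pvCastList; rw [List.map_replicate]; norm_num

-- all lsb-first digits of a natural number (empty for 0), mirroring pvBinAux
def pvLsbN (m : Nat) : List Nat :=
  if _h : m = 0 then [] else m % 2 :: pvLsbN (m / 2)
termination_by m
decreasing_by exact Nat.div_lt_self (Nat.pos_of_ne_zero _h) (by omega)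

theorem pvFixN_length (k m : Nat) : (pvFixN k m).length = k := by
  induction k generalizing m with
  | zero => rfl
  | succ k ih => simp [pvFixN, ih]

theorem pvFixN_zero (k : Nat) : pvFixN k 0 = List.replicate k 0 := by
  induction k with
  | zero => rfl
  | succ k ih => simp [pvFixN, ih, List.replicate_succ]

theorem pvFixN_add (a b m : Nat) : pvFixN (a + b) m = pvFixN a m ++ pvFixN b (m / 2 ^ a) := by
  induction a generalizing m with
  | zero => simp [pvFixN]
  | succ a ih =>
    have h : a + 1 + b = (a + b) + 1 := by omega
    rw [h]
    simp only [pvFixN, ih, List.cons_append]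
    rw [Nat.div_div_eq_div_mul]
    ring_nf

theorem pvInner_spec (k : Nat) : ∀ (m : Nat) (bits : List Int) (p : Int),
    pvInner k ((m : Nat) : Int) bits p
      = (((m / 2 ^ k : Nat) : Int), bits ++ pvCastList (pvFixN k m),
         (pvCastList (pvFixN k m)).foldl PySem.Int.bxor p) := by
  induction k with
  | zero => intro m bits p; simp [pvInner, pvFixN, pvCastList]
  | succ k ih =>
    intro m bits p
    have hfd : PySem.Int.floordiv ((m : Nat) : Int) 2 = ((m / 2 : Nat) : Int) := by
      exact_mod_cast PySem.Int.floordiv_natCast m 2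
    have hmd : PySem.Int.mod ((m : Nat) : Int) 2 = ((m % 2 : Nat) : Int) := by
      exact_mod_cast PySem.Int.mod_natCast m 2
    simp only [pvInner, pvFixN, hfd, hmd, pvCastList_cons]
    rw [ih (m / 2) (bits ++ [((m % 2 : Nat) : Int)]) (PySem.Int.bxor p ((m % 2 : Nat) : Int))]
    rw [Nat.div_div_eq_div_mul]
    have h2 : 2 * 2 ^ k = 2 ^ (k + 1) := by ring
    simp [h2, List.foldl_cons]

theorem pvBin_map (m : Nat) :
    (pvBinAux m).map pvDigit = pvCastList ((pvLsbN m).reverse) := by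
  induction m using Nat.strong_induction_on with
  | _ m ih =>
    by_cases h : m = 0
    · subst h; simp [pvBinAux, pvLsbN, pvCastList_nil]
    · rw [pvBinAux, pvLsbN]
      simp only [h, dif_neg, not_false_iff, List.map_append, List.reverse_cons]
      rw [ih (m / 2) (Nat.div_lt_self (Nat.pos_of_ne_zero h) (by omega))]
      rw [pvCastList_append]
      congr 1
      have hm2 : m % 2 = 0 ∨ m % 2 = 1 := by omega
      rcases hm2 with h2 | h2 <;> simp [h2, pvDigit, pvCastList]

theorem pvFixN_eq_pad (k : Nat) : ∀ m, m < 2 ^ k →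
    pvFixN k m = pvLsbN m ++ List.replicate (k - (pvLsbN m).length) 0 := by
  induction k with
  | zero => intro m h; interval_cases m; simp [pvFixN, pvLsbN]
  | succ k ih =>
    intro m h
    by_cases h0 : m = 0
    · subst h0; simp [pvLsbN, pvFixN_zero]
    · rw [pvFixN, pvLsbN]
      simp only [h0, dif_neg, not_false_iff, List.cons_append, List.length_cons]
      have hp : 0 < (2 : Nat) ^ k := by positivity
      have he : (2 : Nat) ^ (k + 1) = 2 ^ k * 2 := by ring
      have hlt : m / 2 < 2 ^ k := by omega
      rw [ih _ hlt]
      have hL : k + 1 - ((pvLsbN (m / 2)).length + 1) = k - (pvLsbN (m / 2)).length := by omega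
      rw [hL]

-- xor-fold over naturals is insensitive to reversal
theorem pv_foldl_xor_shift (l : List Nat) : ∀ (a x : Nat),
    l.foldl (fun r d => r ^^^ d) (a ^^^ x) = (l.foldl (fun r d => r ^^^ d) a) ^^^ x := by
  induction l with
  | nil => intro a x; rfl
  | cons y ys ih =>
    intro a x
    simp only [List.foldl_cons]
    rw [show a ^^^ x ^^^ y = a ^^^ y ^^^ x by
      rw [Nat.xor_assoc, Nat.xor_assoc, Nat.xor_comm x y], ih]

theorem pv_foldl_xor_reverse (l : List Nat) (a : Nat) :
    l.reverse.foldl (fun r d => r ^^^ d) a = l.foldl (fun r d => r ^^^ d) a := by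
  induction l generalizing a with
  | nil => rfl
  | cons y ys ih =>
    simp only [List.reverse_cons, List.foldl_append, List.foldl_cons, List.foldl_nil, ih]
    rw [← pv_foldl_xor_shift ys a y]

-- folding Python xor over cast digits is the cast of the natural xor-fold
theorem pv_foldl_bxor_cast (l : List Nat) : ∀ (a : Nat),
    (pvCastList l).foldl PySem.Int.bxor ((a : Nat) : Int)
      = ((l.foldl (fun r d => r ^^^ d) a : Nat) : Int) := by
  induction l with
  | nil => intro a; rfl
  | cons y ys ih =>
    intro a
    simp only [pvCastList_cons, List.foldl_cons, PySem.Int.bxor_natCast]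
    exact ih (a ^^^ y)

theorem pvParity_eq_fold (l : List Char) :
    pvParity l = (l.map pvDigit).foldl PySem.Int.bxor 0 := by
  rw [pvParity, List.foldl_map]

theorem pvParity_mem (b : List Char) (p : Int) (hp : p = 0 ∨ p = 1) :
    b.foldl (fun r d => PySem.Int.bxor r (pvDigit d)) p = 0
      ∨ b.foldl (fun r d => PySem.Int.bxor r (pvDigit d)) p = 1 := by
  induction b generalizing p with
  | nil => simpa using hp
  | cons c cs ih =>
    have hd : pvDigit c = 0 ∨ pvDigit c = 1 := by unfold pvDigit; split <;> simp
    refine ih _ ?_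
    rcases hp with hp | hp <;> rcases hd with hd | hd <;> simp [hp, hd] <;> decide

theorem pvParityChar_digit (p : Int) (hp : p = 0 ∨ p = 1) : pvDigit (pvParityChar p) = p := by
  rcases hp with hp | hp <;> subst hp <;> decide

theorem pvBinAux_len (k : Nat) : ∀ n, n < 2 ^ k → (pvBinAux n).length ≤ k := by
  induction k with
  | zero => intro n h; interval_cases n; simp [pvBinAux]
  | succ k ih =>
    intro n h
    by_cases hn : n = 0
    · subst hn; simp [pvBinAux]
    · rw [pvBinAux]; simp only [hn, dif_neg, not_false_iff]
      have hpos : 0 < (2 : Nat) ^ k := by positivity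
      have hp : (2 : Nat) ^ (k + 1) = 2 ^ k * 2 := by ring
      have h2 : n / 2 < 2 ^ k := by omega
      have := ih _ h2
      simp only [List.length_append, List.length_singleton]
      omega

theorem pvFormatBin_len (i : Int) (h0 : 0 ≤ i) (h1 : i < 16384) :
    1 ≤ (pvFormatBin i).length ∧ (pvFormatBin i).length ≤ 14 := by
  unfold pvFormatBin pvBinNat
  rw [if_neg (by omega)]
  by_cases hz : i.toNat = 0
  · simp [hz]
  · rw [if_neg hz]
    constructor
    · rw [pvBinAux]; simp only [hz, dif_neg, not_false_iff]; simp
    · exact pvBinAux_len 14 i.toNat (by omega)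

-- fold of xor-with-digit over a run of '0' characters leaves the accumulator unchanged
theorem pvFoldl_rep (k : Nat) (p : Int) :
    (List.replicate k '0').foldl (fun r c => PySem.Int.bxor r (pvDigit c)) p = p := by
  induction k generalizing p with
  | zero => rfl
  | succ k ih =>
    have h0 : pvDigit '0' = 0 := by decide
    have hx : PySem.Int.bxor p 0 = p := PySem.Int.bxor_zero p
    simp [List.replicate_succ, h0, hx, ih]

-- A's result, normalised: 48 zeros, then the two 7-char chunks of the zero-padded
-- 14-char binary string, each followed by its parity digit
theorem pv_main (b : List Char) (h1 : 1 ≤ b.length) (h2 : b.length ≤ 14) :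
    (if b.length ≤ 7 then
      (List.replicate 56 '0' ++ List.replicate (7 - b.length) '0' ++ b
        ++ [pvParityChar (pvParity b)]).map pvDigit
    else if b.length ≤ 14 then
      (List.replicate 48 '0'
        ++ (List.replicate (7 - (PySem.List.slice b none (some (-7))).length) '0'
            ++ PySem.List.slice b none (some (-7))
            ++ [pvParityChar (pvParity (PySem.List.slice b none (some (-7))))])
        ++ (PySem.List.slice b (some (-7)) none
            ++ [pvParityChar (pvParity (PySem.List.slice b (some (-7)) none))])).map pvDigit
    else []) =
      List.replicate 48 0
        ++ ((List.replicate (14 - b.length) '0' ++ b).take 7).map pvDigit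
        ++ [pvParity ((List.replicate (14 - b.length) '0' ++ b).take 7)]
        ++ ((List.replicate (14 - b.length) '0' ++ b).drop 7).map pvDigit
        ++ [pvParity ((List.replicate (14 - b.length) '0' ++ b).drop 7)] := by
  have h0 : pvDigit '0' = 0 := by decide
  have hrep56 : (List.replicate 56 (0 : Int)) = List.replicate 48 0 ++ List.replicate 7 0 ++ [0] := by decide
  by_cases h7 : b.length ≤ 7
  · rw [if_pos h7]
    have htake : (List.replicate (14 - b.length) '0' ++ b).take 7 = List.replicate 7 '0' := by
      rw [List.take_append, List.take_replicate]
      have hmin : min 7 (14 - b.length) = 7 := by omega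
      rw [hmin]
      have hz : 7 - (14 - b.length) = 0 := by omega
      simp [List.length_replicate, hz]
    have hdrop : (List.replicate (14 - b.length) '0' ++ b).drop 7
        = List.replicate (7 - b.length) '0' ++ b := by
      rw [List.drop_append, List.drop_replicate]
      have hd : 14 - b.length - 7 = 7 - b.length := by omega
      rw [hd]
      have hz : 7 - (14 - b.length) = 0 := by omega
      simp [List.length_replicate, hz]
    rw [htake, hdrop]
    have hp1 : pvParity (List.replicate 7 '0') = 0 := pvFoldl_rep 7 0
    have hp2 : pvParity (List.replicate (7 - b.length) '0' ++ b) = pvParity b := by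
      unfold pvParity
      rw [List.foldl_append, pvFoldl_rep]
    rw [hp1, hp2]
    have hpb : pvParity b = 0 ∨ pvParity b = 1 := pvParity_mem b 0 (Or.inl rfl)
    simp only [List.map_append, List.map_replicate, h0, List.map_cons, List.map_nil,
      pvParityChar_digit _ hpb, hrep56, List.append_assoc]
  · rw [if_neg h7, if_pos h2]
    have hlow : PySem.List.slice b (some (-7)) none = b.drop (b.length - 7) := by
      rw [PySem.List.slice_from_neg_ofNat b 7 (by norm_num)]
    have hhigh : PySem.List.slice b none (some (-7)) = b.take (b.length - 7) := by
      rw [PySem.List.slice_to_neg_ofNat b 7 (by norm_num)]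
    have hhl : (b.take (b.length - 7)).length = b.length - 7 := by
      rw [List.length_take]; omega
    have htake : (List.replicate (14 - b.length) '0' ++ b).take 7
        = List.replicate (14 - b.length) '0' ++ b.take (b.length - 7) := by
      rw [List.take_append, List.take_replicate]
      have hm : min 7 (14 - b.length) = 14 - b.length := by omega
      have hn : 7 - (List.replicate (14 - b.length) '0').length = b.length - 7 := by
        simp [List.length_replicate]; omega
      rw [hm, hn]
    have hdrop : (List.replicate (14 - b.length) '0' ++ b).drop 7 = b.drop (b.length - 7) := by
      rw [List.drop_append, List.drop_replicate]
      have hm : 14 - b.length - 7 = 0 := by omega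
      have hn : 7 - (List.replicate (14 - b.length) '0').length = b.length - 7 := by
        simp [List.length_replicate]; omega
      rw [hm, hn]; simp
    rw [htake, hdrop, hlow, hhigh, hhl]
    have hph : pvParity (List.replicate (14 - b.length) '0' ++ b.take (b.length - 7))
        = pvParity (b.take (b.length - 7)) := by
      unfold pvParity
      rw [List.foldl_append, pvFoldl_rep]
    rw [hph]
    have hpbh : pvParity (b.take (b.length - 7)) = 0 ∨ pvParity (b.take (b.length - 7)) = 1 :=
      pvParity_mem (b.take (b.length - 7)) 0 (Or.inl rfl)
    have hpbl : pvParity (b.drop (b.length - 7)) = 0 ∨ pvParity (b.drop (b.length - 7)) = 1 :=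
      pvParity_mem (b.drop (b.length - 7)) 0 (Or.inl rfl)
    have h14 : 7 - (b.length - 7) = 14 - b.length := by omega
    simp only [List.map_append, List.map_replicate, h0, List.map_cons, List.map_nil,
      h14, List.append_assoc]
    rw [pvParityChar_digit _ hpbh, pvParityChar_digit _ hpbl]

-- the padded binary string's digit list is the reversed 14-bit lsb digit list of m
theorem pv_map_pad (m : Nat) (hm : m < 16384) :
    ((List.replicate (14 - (pvBinNat m).length) '0' ++ pvBinNat m).map pvDigit)
      = pvCastList ((pvFixN 14 m).reverse) := by
  have h0 : pvDigit '0' = 0 := by decide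
  by_cases hz : m = 0
  · subst hz
    rw [pvFixN_zero]
    decide
  · have hb : pvBinNat m = pvBinAux m := by rw [pvBinNat, if_neg hz]
    rw [hb, List.map_append, List.map_replicate, h0, pvBin_map m]
    have hlen : (pvBinAux m).length = (pvLsbN m).length := by
      have h := congrArg List.length (pvBin_map m)
      simpa [pvCastList_length] using h
    rw [pvFixN_eq_pad 14 m hm, List.reverse_append, List.reverse_replicate, hlen,
      pvCastList_append, pvCastList_replicate_zero]

theorem pv_main_nat (m : Nat) (hm : m < 16384) :
    form_64bit_key ((m : Nat) : Int) = form_64bit_key_alt ((m : Nat) : Int) := by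
  have hfb : pvFormatBin ((m : Nat) : Int) = pvBinNat m := by
    rw [pvFormatBin, if_neg (by omega)]
    norm_num
  obtain ⟨hl1, hl2⟩ := pvFormatBin_len ((m : Nat) : Int) (by omega) (by exact_mod_cast hm)
  rw [hfb] at hl1 hl2
  -- chunk decomposition of the 14-bit digit list
  have hsplit : pvFixN 14 m = pvFixN 7 m ++ pvFixN 7 (m / 128) := by
    have h := pvFixN_add 7 7 m
    norm_num at h
    exact h
  have hrev : pvCastList ((pvFixN 14 m).reverse)
      = pvCastList ((pvFixN 7 (m / 128)).reverse) ++ pvCastList ((pvFixN 7 m).reverse) := by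
    rw [hsplit, List.reverse_append, pvCastList_append]
  have hlen7 : (pvCastList ((pvFixN 7 (m / 128)).reverse)).length = 7 := by
    simp [pvCastList_length, pvFixN_length]
  have hmap := pv_map_pad m hm
  have htake : ((List.replicate (14 - (pvBinNat m).length) '0' ++ pvBinNat m).take 7).map pvDigit
      = pvCastList ((pvFixN 7 (m / 128)).reverse) := by
    rw [List.map_take, hmap, hrev, List.take_append, List.take_of_length_le (by omega), hlen7]
    simp
  have hdrop : ((List.replicate (14 - (pvBinNat m).length) '0' ++ pvBinNat m).drop 7).map pvDigit
      = pvCastList ((pvFixN 7 m).reverse) := by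
    rw [List.map_drop, hmap, hrev, List.drop_append, List.drop_of_length_le (by omega), hlen7]
    simp
  have hfold : ∀ l : List Nat,
      (pvCastList l.reverse).foldl PySem.Int.bxor 0
        = (pvCastList l).foldl PySem.Int.bxor 0 := by
    intro l
    have h1 := pv_foldl_bxor_cast l.reverse 0
    have h2 := pv_foldl_bxor_cast l 0
    rw [show ((0 : Nat) : Int) = (0 : Int) by norm_num] at h1 h2
    rw [h1, h2, pv_foldl_xor_reverse]
  have hptake : pvParity ((List.replicate (14 - (pvBinNat m).length) '0' ++ pvBinNat m).take 7)
      = (pvCastList (pvFixN 7 (m / 128))).foldl PySem.Int.bxor 0 := by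
    rw [pvParity_eq_fold, htake, hfold]
  have hpdrop : pvParity ((List.replicate (14 - (pvBinNat m).length) '0' ++ pvBinNat m).drop 7)
      = (pvCastList (pvFixN 7 m)).foldl PySem.Int.bxor 0 := by
    rw [pvParity_eq_fold, hdrop, hfold]
  -- left side: unfold A and normalise
  rw [form_64bit_key]
  simp only [hfb]
  rw [pv_main (pvBinNat m) hl1 hl2, htake, hdrop, hptake, hpdrop]
  -- right side: unfold B's two divmod passes
  rw [form_64bit_key_alt]
  simp only [pvOuter, pvInner_spec]
  simp [pvCastList_reverse]

-- ===== VERDICT (by name: the statement is the Claim_ definition above) =====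
theorem form_64bit_key_spec : Claim_equal_form_64bit_key := by
  intro int_key _ hpre
  obtain ⟨h0, h1⟩ := hpre
  unfold Spec_form_64bit_key
  have h : int_key = ((int_key.toNat : Nat) : Int) := by omega
  rw [h]
  exact pv_main_nat int_key.toNat (by omega)
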